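-- pv_equiv track=rewrite | github.com/omersalman17/Introduction-To-Computer-Science | WaveEditor/wave_editor.py | low_pass_filter
-- ===== SOURCE A (Python) =====
-- CH1 = 0
--
-- CH2 = 1
--
-- def audio_sum(audio_first_i, audio_second_i):
--     # calculate sum of the audio
--     sum = []
--     sum_first_channel = int((audio_first_i[CH1] + audio_second_i[CH1]) / 2)
--     sum.append(sum_first_channel)
--     sum_second_channel = int((audio_first_i[CH2] + audio_second_i[CH2]) / 2)
--     sum.append(sum_second_channel)
--     return sum
--
-- def low_pass_filter(audio_data):
--     # function low pass filter the audio
--     if not audio_data: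
--         return []
--     low_pass_audio = []
--     i = 1
--     if len(audio_data) == 1:
--         low_pass_audio.append(audio_data[0])
--         return low_pass_audio
--     low_pass_audio.append(audio_sum(audio_data[0], audio_data[1]))
--     while i < len(audio_data) - 1:
--         low_pass_audio.append(sum_for_low_pass_filter(audio_data, i))
--         i += 1
--     low_pass_audio.append(audio_sum(audio_data[i - 1], audio_data[i]))
--     return low_pass_audio
--
-- def sum_for_low_pass_filter(audio_data, i):
--     # sums the low pass ilter
--     low_pass_sum = []
--     lp_ch1 = audio_data[i - 1][CH1] + audio_data[i][CH1] + audio_data[i + 1][CH1]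
--     lp_ch1 = int(lp_ch1 / 3)
--     low_pass_sum.append(lp_ch1)
--     lp_ch2 = audio_data[i - 1][CH2] + audio_data[i][CH2] + audio_data[i + 1][CH2]
--     lp_ch2 = int(lp_ch2 / 3)
--     low_pass_sum.append(lp_ch2)
--     return low_pass_sum
-- ===== SOURCE B (Python) =====
-- def low_pass_filter(audio_data):
--     # Prefix-sum approach: build cumulative channel sums once, then each output
--     # is a range-sum query (two lookups and a subtraction) instead of re-adding
--     # the window's samples.
--     n = len(audio_data)
--     if n == 1:
--         return [audio_data[0]]
--     p1 = [0]
--     p2 = [0]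
--     for s in audio_data:
--         p1.append(p1[-1] + s[0])
--         p2.append(p2[-1] + s[1])
--     out = []
--     for i in range(n):
--         lo = max(0, i - 1)
--         hi = min(n, i + 2)
--         k = hi - lo
--         out.append([int((p1[hi] - p1[lo]) / k), int((p2[hi] - p2[lo]) / k)])
--     return out
-- ===== Notes on version B (the rewrite author's own statement) =====
-- stated objective: alternative
-- what changed: Replaces A's branch-per-position sliding-window summation (first pair, while-loop middle triples, last pair via two helpers) by a prefix-sum algorithm: one pass builds cumulative per-channel sums, then each output sample is a range-sum query p[hi]-p[lo] divided by the window length.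
import Mathlib
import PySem

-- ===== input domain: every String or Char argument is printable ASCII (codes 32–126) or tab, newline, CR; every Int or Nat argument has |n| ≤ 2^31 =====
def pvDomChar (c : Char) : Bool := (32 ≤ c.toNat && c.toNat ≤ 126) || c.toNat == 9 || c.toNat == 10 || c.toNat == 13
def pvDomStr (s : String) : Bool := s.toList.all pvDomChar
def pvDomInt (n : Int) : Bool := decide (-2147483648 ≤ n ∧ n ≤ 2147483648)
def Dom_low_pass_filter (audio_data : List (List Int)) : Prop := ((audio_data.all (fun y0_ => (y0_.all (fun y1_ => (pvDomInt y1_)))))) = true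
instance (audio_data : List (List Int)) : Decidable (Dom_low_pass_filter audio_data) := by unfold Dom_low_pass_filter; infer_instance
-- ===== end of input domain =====

-- B replaces A's branch-per-position sliding-window summation by a prefix-sum
-- algorithm: cumulative per-channel sums built once, each output a range-sum
-- query p[hi]-p[lo] divided by the window length (objective: alternative).

-- ===== PORT A =====
-- helper audio_sum; int((x+y)/2) is Python float-truncating division = truncdiv on this domain
def audio_sum (audio_first_i audio_second_i : List Int) : List Int :=
  let sum_first_channel := PySem.Int.truncdiv
    (PySem.List.pyGetD audio_first_i 0 0 + PySem.List.pyGetD audio_second_i 0 0) 2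
  let sum_second_channel := PySem.Int.truncdiv
    (PySem.List.pyGetD audio_first_i 1 0 + PySem.List.pyGetD audio_second_i 1 0) 2
  [sum_first_channel, sum_second_channel]

-- helper sum_for_low_pass_filter
def sum_for_low_pass_filter (audio_data : List (List Int)) (i : Int) : List Int :=
  let lp_ch1 := PySem.List.pyGetD (PySem.List.pyGetD audio_data (i-1) []) 0 0
              + PySem.List.pyGetD (PySem.List.pyGetD audio_data i []) 0 0
              + PySem.List.pyGetD (PySem.List.pyGetD audio_data (i+1) []) 0 0
  let lp_ch2 := PySem.List.pyGetD (PySem.List.pyGetD audio_data (i-1) []) 1 0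
              + PySem.List.pyGetD (PySem.List.pyGetD audio_data i []) 1 0
              + PySem.List.pyGetD (PySem.List.pyGetD audio_data (i+1) []) 1 0
  [PySem.Int.truncdiv lp_ch1 3, PySem.Int.truncdiv lp_ch2 3]

def low_pass_filter (audio_data : List (List Int)) : List (List Int) :=
  if audio_data = [] then []
  else
    let n : Int := audio_data.length
    if n = 1 then [PySem.List.pyGetD audio_data 0 []]
    else
      -- 'while i < n-1' appends sum_for_low_pass_filter for i = 1 .. n-2; afterwards i = n-1,
      -- so the final append is audio_sum(audio_data[n-2], audio_data[n-1])
      (audio_sum (PySem.List.pyGetD audio_data 0 []) (PySem.List.pyGetD audio_data 1 []))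
        :: (PySem.List.pyRange 1 (n-1) 1).map (sum_for_low_pass_filter audio_data)
        ++ [audio_sum (PySem.List.pyGetD audio_data (n-2) []) (PySem.List.pyGetD audio_data (n-1) [])]

-- ===== PORT B =====
-- loop body of Source B's first pass: extend both cumulative-sum lists (p1[-1] + s[0], p2[-1] + s[1])
def lpStep (p : List Int × List Int) (s : List Int) : List Int × List Int :=
  (p.1 ++ [PySem.List.pyGetD p.1 (-1) 0 + PySem.List.pyGetD s 0 0],
   p.2 ++ [PySem.List.pyGetD p.2 (-1) 0 + PySem.List.pyGetD s 1 0])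

def low_pass_filter_alt (audio_data : List (List Int)) : List (List Int) :=
  let n : Int := audio_data.length
  if n = 1 then [PySem.List.pyGetD audio_data 0 []]
  else
    let p := audio_data.foldl lpStep ([0], [0])
    (PySem.List.pyRange 0 n 1).map (fun i =>
      let lo := max 0 (i - 1)
      let hi := min n (i + 2)
      let k := hi - lo
      [PySem.Int.truncdiv (PySem.List.pyGetD p.1 hi 0 - PySem.List.pyGetD p.1 lo 0) k,
       PySem.Int.truncdiv (PySem.List.pyGetD p.2 hi 0 - PySem.List.pyGetD p.2 lo 0) k])

-- ===== PRECONDITION & SPEC =====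
-- Pre_ excludes exactly the inputs on which A raises IndexError: two or more samples
-- with some sample shorter than 2 channels (A then indexes channel 1 of every sample).
def Pre_low_pass_filter (audio_data : List (List Int)) : Prop :=
  audio_data.length ≤ 1 ∨ ∀ row ∈ audio_data, 2 ≤ row.length
instance (audio_data : List (List Int)) : Decidable (Pre_low_pass_filter audio_data) := by
  unfold Pre_low_pass_filter; infer_instance

def pvWitness_low_pass_filter : List (List Int) := [[1, 2], [3, 4], [5, 6]]

def Spec_low_pass_filter (audio_data : List (List Int)) (out : List (List Int)) : Prop := out = low_pass_filter_alt audio_data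
instance (audio_data : List (List Int)) (out : List (List Int)) : Decidable (Spec_low_pass_filter audio_data out) := by unfold Spec_low_pass_filter; infer_instance

-- ===== CLAIM (what is proved, stated in full; the proofs are below) =====
def Claim_equal_low_pass_filter : Prop := ∀ (audio_data : List (List Int)), Dom_low_pass_filter audio_data → Pre_low_pass_filter audio_data → Spec_low_pass_filter audio_data (low_pass_filter audio_data)

-- ===== LEMMAS AND PROOFS =====

-- proof-only helper: the clamped-window average at index i (shared normal form of both ports)
def winAvg (audio_data : List (List Int)) (i : Int) : List Int :=
  let window := PySem.List.slice audio_data (some (max 0 (i-1))) (some (i+2))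
  let k : Int := window.length
  [PySem.Int.truncdiv (window.foldl (fun acc r => acc + PySem.List.pyGetD r 0 0) 0) k,
   PySem.Int.truncdiv (window.foldl (fun acc r => acc + PySem.List.pyGetD r 1 0) 0) k]

-- proof-only helper: the intended value of the cumulative-sum list built by B's first pass
def prefSums (f : List Int → Int) (xs : List (List Int)) : List Int :=
  (List.range (xs.length+1)).map (fun j => ((xs.take j).map f).sum)

lemma prefSums_last (f : List Int → Int) (xs : List (List Int)) :
    PySem.List.pyGetD (prefSums f xs) (-1) 0 = (xs.map f).sum := by
  unfold prefSums
  rw [List.range_succ, List.map_append, List.map_singleton,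
      PySem.List.pyGetD_neg_one_append_singleton, List.take_of_length_le (le_refl _)]

lemma prefSums_append (f : List Int → Int) (xs : List (List Int)) (a : List Int) :
    prefSums f (xs ++ [a]) = prefSums f xs ++ [(xs.map f).sum + f a] := by
  unfold prefSums
  rw [show (xs ++ [a]).length = xs.length + 1 from by simp,
      List.range_succ (n := xs.length + 1), List.map_append, List.map_singleton]
  congr 1
  · apply List.map_congr_left
    intro j hj
    rw [List.mem_range] at hj
    rw [List.take_append_of_le_length (by omega)]
  · rw [List.take_of_length_le (by simp), List.map_append, List.sum_append]
    simp

lemma foldl_lpStep (xs : List (List Int)) :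
    xs.foldl lpStep ([0], [0]) = (prefSums (fun r => PySem.List.pyGetD r 0 0) xs,
                                  prefSums (fun r => PySem.List.pyGetD r 1 0) xs) := by
  induction xs using List.reverseRecOn with
  | nil => simp [prefSums]
  | append_singleton xs a ih =>
    rw [List.foldl_append, ih, List.foldl_cons, List.foldl_nil]
    unfold lpStep
    simp only []
    rw [prefSums_last, prefSums_last, prefSums_append, prefSums_append]

lemma prefSums_get (f : List Int → Int) (xs : List (List Int)) (j : Int)
    (h0 : 0 ≤ j) (h : j ≤ (xs.length : Int)) :
    PySem.List.pyGetD (prefSums f xs) j 0 = ((xs.take j.toNat).map f).sum := by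
  rw [PySem.List.pyGetD_eq_getElem (prefSums f xs) 0 h0 (by unfold prefSums; simp; omega)]
  unfold prefSums
  simp

lemma window_sum (f : List Int → Int) (xs : List (List Int)) (lo hi : Nat)
    (h1 : lo ≤ hi) (_h2 : hi ≤ xs.length) :
    ((xs.take hi).map f).sum - ((xs.take lo).map f).sum
      = (((xs.drop lo).take (hi - lo)).map f).sum := by
  have : xs.take hi = xs.take lo ++ (xs.drop lo).take (hi - lo) := by
    conv_lhs => rw [show hi = lo + (hi - lo) from by omega]
    rw [List.take_add]
  rw [this, List.map_append, List.sum_append]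
  ring

-- B's per-index value equals the clamped-window average
lemma bElem_eq_winAvg (xs : List (List Int)) (i : Int)
    (h0 : 0 ≤ i) (hn : i < (xs.length : Int)) :
    (let p := xs.foldl lpStep ([0], [0])
     let lo := max 0 (i - 1)
     let hi := min (xs.length : Int) (i + 2)
     let k := hi - lo
     [PySem.Int.truncdiv (PySem.List.pyGetD p.1 hi 0 - PySem.List.pyGetD p.1 lo 0) k,
      PySem.Int.truncdiv (PySem.List.pyGetD p.2 hi 0 - PySem.List.pyGetD p.2 lo 0) k])
    = winAvg xs i := by
  unfold winAvg
  simp only [foldl_lpStep]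
  have hlo0 : 0 ≤ max 0 (i - 1) := le_max_left _ _
  have hhi0 : 0 ≤ min (xs.length : Int) (i + 2) := by omega
  have hlohi : max 0 (i - 1) ≤ min (xs.length : Int) (i + 2) := by omega
  have hhin : min (xs.length : Int) (i + 2) ≤ (xs.length : Int) := min_le_left _ _
  set lo := max 0 (i - 1) with hlo
  set hi := min (xs.length : Int) (i + 2) with hhi
  have hwin : PySem.List.slice xs (some lo) (some (i + 2))
      = (xs.drop lo.toNat).take (hi.toNat - lo.toNat) := by
    rw [PySem.List.slice_toNat xs hlo0 (by omega)]
    by_cases hle : i + 2 ≤ (xs.length : Int)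
    · rw [show hi = i + 2 from by omega]
    · have h1 : xs.length ≤ (i+2).toNat - lo.toNat + lo.toNat := by omega
      have h2 : xs.length ≤ hi.toNat - lo.toNat + lo.toNat := by omega
      rw [List.take_of_length_le (by simpa using h1), List.take_of_length_le (by simpa using h2)]
  rw [hwin]
  have hlen : (((xs.drop lo.toNat).take (hi.toNat - lo.toNat)).length : Int) = hi - lo := by
    simp; omega
  have key : ∀ f : List Int → Int,
      PySem.List.pyGetD (prefSums f xs) hi 0 - PySem.List.pyGetD (prefSums f xs) lo 0
        = (((xs.drop lo.toNat).take (hi.toNat - lo.toNat)).map f).sum := by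
    intro f
    rw [prefSums_get f xs hi hhi0 hhin, prefSums_get f xs lo hlo0 (by omega),
        window_sum f xs lo.toNat hi.toNat (by omega) (by omega)]
  rw [PySem.List.foldl_add, PySem.List.foldl_add, key, key, hlen]
  simp

lemma drop_pair {α : Type} (xs : List α) (k : Nat) (h : k + 2 = xs.length) :
    xs.drop k = [xs[k]'(by omega), xs[k+1]'(by omega)] := by
  rw [List.drop_eq_getElem_cons (by omega), List.drop_eq_getElem_cons (by omega)]
  simp [List.drop_eq_nil_of_le (by omega : xs.length ≤ k + 1 + 1), -List.getElem_cons_drop]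

lemma drop_take_three {α : Type} (xs : List α) (k : Nat) (h : k + 3 ≤ xs.length) :
    (xs.drop k).take 3 = [xs[k]'(by omega), xs[k+1]'(by omega), xs[k+2]'(by omega)] := by
  rw [List.drop_eq_getElem_cons (by omega), List.drop_eq_getElem_cons (by omega),
      List.drop_eq_getElem_cons (by omega)]
  simp [-List.getElem_cons_drop]

lemma winAvg_zero (a b : List Int) (tl : List (List Int)) :
    winAvg (a :: b :: tl) 0 = audio_sum a b := by
  unfold winAvg audio_sum
  rw [show max (0:Int) (0-1) = 0 from by norm_num,
      PySem.List.slice_zero_start, PySem.List.slice_to _ (by norm_num : (0:Int) ≤ 0+2)]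
  norm_num [show Int.toNat 2 = 2 from by decide,
    show min (2:Nat) (tl.length+1+1) = 2 from by omega,
    show min (2:Int) ((tl.length:Int)+1+1) = 2 from by omega,
    List.take_succ_cons, PySem.List.pyGetD_ofNat']

lemma winAvg_mid (xs : List (List Int)) (k : Nat) (h : k + 3 ≤ xs.length) :
    winAvg xs ((k:Int)+1) = sum_for_low_pass_filter xs ((k:Int)+1) := by
  unfold winAvg sum_for_low_pass_filter
  rw [show ((k:Int)+1-1) = (k:Int) from by ring,
      max_eq_right (Int.natCast_nonneg k),
      show ((k:Int)+1+2) = (k:Int)+((3:Nat):Int) from by push_cast; ring,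
      PySem.List.slice_natCast_add, drop_take_three xs k h,
      PySem.List.pyGetD_of_nonneg (i := (k:Int)) xs [] (by omega),
      PySem.List.pyGetD_of_nonneg (i := (k:Int)+1) xs [] (by omega),
      PySem.List.pyGetD_of_nonneg (i := (k:Int)+1+1) xs [] (by omega),
      show ((k:Int)).toNat = k from by omega,
      show ((k:Int)+1).toNat = k+1 from by omega,
      show ((k:Int)+1+1).toNat = k+2 from by omega,
      List.getD_eq_getElem xs [] (by omega : k < xs.length),
      List.getD_eq_getElem xs [] (by omega : k+1 < xs.length),
      List.getD_eq_getElem xs [] (by omega : k+2 < xs.length)]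
  norm_num

lemma winAvg_last (xs : List (List Int)) (k : Nat) (hk : k + 2 = xs.length) :
    winAvg xs ((k:Int)+1)
      = audio_sum (PySem.List.pyGetD xs (k:Int) []) (PySem.List.pyGetD xs ((k:Int)+1) []) := by
  unfold winAvg audio_sum
  rw [show ((k:Int)+1-1) = (k:Int) from by ring,
      max_eq_right (Int.natCast_nonneg k),
      show ((k:Int)+1+2) = (k:Int)+((3:Nat):Int) from by push_cast; ring,
      PySem.List.slice_natCast_add, drop_pair xs k hk,
      PySem.List.pyGetD_of_nonneg (i := (k:Int)) xs [] (by omega),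
      PySem.List.pyGetD_of_nonneg (i := (k:Int)+1) xs [] (by omega),
      show ((k:Int)).toNat = k from by omega,
      show ((k:Int)+1).toNat = k+1 from by omega,
      List.getD_eq_getElem xs [] (by omega : k < xs.length),
      List.getD_eq_getElem xs [] (by omega : k+1 < xs.length)]
  norm_num

lemma lpfA_eq (xs : List (List Int)) (h2 : 2 ≤ xs.length) :
    low_pass_filter xs =
      audio_sum (PySem.List.pyGetD xs 0 []) (PySem.List.pyGetD xs 1 [])
        :: (PySem.List.pyRange 1 ((xs.length:Int)-1) 1).map (sum_for_low_pass_filter xs)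
        ++ [audio_sum (PySem.List.pyGetD xs ((xs.length:Int)-2) [])
              (PySem.List.pyGetD xs ((xs.length:Int)-1) [])] := by
  unfold low_pass_filter
  rw [if_neg (by rintro rfl; simp at h2)]
  simp only []
  rw [if_neg (by omega : ¬ ((xs.length:Int) = 1))]

lemma lpfB_eq (xs : List (List Int)) (h2 : 2 ≤ xs.length) :
    low_pass_filter_alt xs = (PySem.List.pyRange 0 (xs.length:Int) 1).map (winAvg xs) := by
  unfold low_pass_filter_alt
  simp only []
  rw [if_neg (by omega : ¬ ((xs.length:Int) = 1))]
  apply List.map_congr_left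
  intro i hi
  rw [PySem.List.mem_pyRange_one] at hi
  exact bElem_eq_winAvg xs i hi.1 hi.2

lemma lpf_eq (xs : List (List Int)) (hpre : Pre_low_pass_filter xs) :
    low_pass_filter xs = low_pass_filter_alt xs := by
  match xs with
  | [] => rfl
  | [a] => norm_num [low_pass_filter, low_pass_filter_alt]
  | a :: b :: tl =>
    rw [lpfA_eq _ (by simp only [List.length_cons]; omega),
        lpfB_eq _ (by simp only [List.length_cons]; omega)]
    have hsplit : PySem.List.pyRange 0 (((a :: b :: tl).length : Int)) 1
        = 0 :: (PySem.List.pyRange 1 (((a :: b :: tl).length : Int) - 1) 1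
                ++ [((a :: b :: tl).length : Int) - 1]) := by
      rw [PySem.List.pyRange_one_cons (by simp only [List.length_cons]; omega)]
      congr 1
      have h := PySem.List.pyRange_one_succ_right
        (a := 1) (b := ((a :: b :: tl).length : Int) - 1) (by simp only [List.length_cons]; omega)
      rw [show ((a :: b :: tl).length : Int) - 1 + 1
            = ((a :: b :: tl).length : Int) from by ring] at h
      exact h
    rw [hsplit, List.map_cons, List.map_append, List.map_singleton]
    have headeq : audio_sum (PySem.List.pyGetD (a :: b :: tl) 0 [])
        (PySem.List.pyGetD (a :: b :: tl) 1 []) = winAvg (a :: b :: tl) 0 := by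
      rw [winAvg_zero]
      norm_num [PySem.List.pyGetD_ofNat']
    have mapeq : (PySem.List.pyRange 1 (((a :: b :: tl).length : Int) - 1) 1).map
          (sum_for_low_pass_filter (a :: b :: tl))
        = (PySem.List.pyRange 1 (((a :: b :: tl).length : Int) - 1) 1).map
          (winAvg (a :: b :: tl)) := by
      apply List.map_congr_left
      intro i hi
      rw [PySem.List.mem_pyRange_one] at hi
      have hik : i = (((i-1).toNat : Nat) : Int) + 1 := by omega
      rw [hik]
      exact (winAvg_mid _ _ (by simp only [List.length_cons] at hi ⊢; omega)).symm
    have lasteq : audio_sum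
          (PySem.List.pyGetD (a :: b :: tl) (((a :: b :: tl).length : Int) - 2) [])
          (PySem.List.pyGetD (a :: b :: tl) (((a :: b :: tl).length : Int) - 1) [])
        = winAvg (a :: b :: tl) (((a :: b :: tl).length : Int) - 1) := by
      rw [show (((a :: b :: tl).length : Int) - 2) = ((tl.length : Nat) : Int) from by
            simp only [List.length_cons]; push_cast; ring,
          show (((a :: b :: tl).length : Int) - 1) = ((tl.length : Nat) : Int) + 1 from by
            simp only [List.length_cons]; push_cast; ring]
      exact (winAvg_last (a :: b :: tl) tl.length (by simp only [List.length_cons])).symm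
    rw [headeq, mapeq, lasteq]
    simp only [List.cons_append]

-- ===== VERDICT (by name: the statement is the Claim_ definition above) =====
theorem low_pass_filter_spec : Claim_equal_low_pass_filter := by
  intro xs _ hpre
  unfold Spec_low_pass_filter
  exact lpf_eq xs hpre
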